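-- pv_equiv track=rewrite | github.com/wiseah/codetree-TILs | 240711/큰 숫자만 계속 고르기/keep-picking-the-big-number.py | find_max_after_operations
-- ===== SOURCE A (Python) =====
-- import heapq
--
-- def find_max_after_operations(numbers, m):
--     # Python의 heapq는 최소 힙만을 제공하므로, 음수로 변환하여 최대 힙을 만듭니다.
--     max_heap = [-num for num in numbers]
--     heapq.heapify(max_heap)
--
--     # m번 가장 큰 수에서 1씩 빼는 작업을 합니다.
--     for _ in range(m):
--         largest = -heapq.heappop(max_heap)  # 가장 큰 수를 꺼내고
--         largest -= 1  # 그 수에서 1을 빼고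
--         heapq.heappush(max_heap, -largest)  # 다시 힙에 넣습니다.
--
--     # 최종적으로 남아있는 숫자들 중 가장 큰 수를 반환합니다.
--     return -max_heap[0]
-- ===== SOURCE B (Python) =====
-- def find_max_after_operations(numbers, m):
--     # Binary search for the smallest final level v such that the total number of
--     # single decrements needed to bring every number down to at most v is <= m.
--     hi = max(numbers)
--     lo = min(numbers) - max(m, 0)
--     while lo < hi:
--         mid = (lo + hi) // 2
--         if sum(num - mid for num in numbers if num > mid) <= m:
--             hi = mid
--         else:
--             lo = mid + 1
--     return lo
-- ===== Notes on version B (the rewrite author's own statement) =====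
-- stated objective: alternative
-- what changed: Replaces the m-step heap simulation (pop max, decrement, push, m times) by a binary search for the smallest final level v with sum(max(0, num - v)) <= m, which is the final maximum.
import Mathlib
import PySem

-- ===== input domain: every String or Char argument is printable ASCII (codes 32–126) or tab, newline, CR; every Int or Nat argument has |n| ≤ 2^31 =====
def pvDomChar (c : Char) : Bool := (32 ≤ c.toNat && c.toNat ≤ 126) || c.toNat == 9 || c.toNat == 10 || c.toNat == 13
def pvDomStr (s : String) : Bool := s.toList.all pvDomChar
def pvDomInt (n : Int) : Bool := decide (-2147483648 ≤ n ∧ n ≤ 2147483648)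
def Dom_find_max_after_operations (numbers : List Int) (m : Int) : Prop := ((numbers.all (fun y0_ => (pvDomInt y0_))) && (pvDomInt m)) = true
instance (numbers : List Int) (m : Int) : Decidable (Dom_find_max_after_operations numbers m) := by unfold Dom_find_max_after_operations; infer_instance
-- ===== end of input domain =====

-- B replaces A's m-step heap simulation by a binary search on the final level; proved equal on nonempty lists (both raise on []).

-- ===== PORT A =====
-- heapq is ported by its multiset contract: heappop removes and returns the
-- minimum element of the heap, heappush adds one; the values A reads
-- (heappop's results and max_heap[0]) depend only on that multiset.
-- One iteration of A's loop: pop the minimum x (= -largest), push x + 1 (= -(largest-1)).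
def aStep (h : List Int) : List Int :=
  match PySem.List.min? h (fun x => x) with
  | none => h            -- guard: heappop on an empty heap raises (excluded by Pre_)
  | some x => (x + 1) :: h.erase x

def aIter : Nat → List Int → List Int
  | 0, h => h
  | k + 1, h => aIter k (aStep h)

def find_max_after_operations (numbers : List Int) (m : Int) : Int :=
  let max_heap := numbers.map (fun num => -num)
  let final := aIter m.toNat max_heap
  Neg.neg ((PySem.List.min? final (fun x => x)).getD 0)   -- -max_heap[0]; getD unreachable under Pre_

-- ===== PORT B =====
-- cost numbers mid = sum(num - mid for num in numbers if num > mid)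
def bCost (numbers : List Int) (mid : Int) : Int :=
  numbers.foldl (fun acc num => if num > mid then acc + (num - mid) else acc) 0

def bSearch (numbers : List Int) (m lo hi : Int) : Int :=
  if h : lo < hi then
    let mid := PySem.Int.floordiv (lo + hi) 2
    if bCost numbers mid ≤ m then bSearch numbers m lo mid
    else bSearch numbers m (mid + 1) hi
  else lo
termination_by (hi - lo).toNat
decreasing_by
  · have := PySem.Int.floordiv_two_mid_bounds (lo := lo) (hi := hi) (by omega)
    have h2 : PySem.Int.floordiv (lo + hi) 2 < hi := by
      have := PySem.Int.floordiv_eq_ediv_of_pos (a := lo + hi) (b := 2) (by omega)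
      omega
    omega
  · have := PySem.Int.floordiv_two_mid_bounds (lo := lo) (hi := hi) (by omega)
    omega

def find_max_after_operations_alt (numbers : List Int) (m : Int) : Int :=
  let hi := (PySem.List.max? numbers (fun x => x)).getD 0
  let lo := (PySem.List.min? numbers (fun x => x)).getD 0 - max m 0
  bSearch numbers m lo hi

-- ===== PRECONDITION & SPEC =====
-- A raises IndexError on numbers = [] (heappop / max_heap[0] on an empty heap); B raises there too (max([])).
def Pre_find_max_after_operations (numbers : List Int) (m : Int) : Prop := numbers ≠ []
instance (numbers : List Int) (m : Int) : Decidable (Pre_find_max_after_operations numbers m) := by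
  unfold Pre_find_max_after_operations; infer_instance
def pvWitness_find_max_after_operations : List Int × Int := ([3, 5, 2], 4)

def Spec_find_max_after_operations (numbers : List Int) (m : Int) (out : Int) : Prop := out = find_max_after_operations_alt numbers m
instance (numbers : List Int) (m : Int) (out : Int) : Decidable (Spec_find_max_after_operations numbers m out) := by unfold Spec_find_max_after_operations; infer_instance

-- ===== CLAIM (what is proved, stated in full; the proofs are below) =====
def Claim_equal_find_max_after_operations : Prop := ∀ (numbers : List Int) (m : Int), Dom_find_max_after_operations numbers m → Pre_find_max_after_operations numbers m → Spec_find_max_after_operations numbers m (find_max_after_operations numbers m)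

-- ===== LEMMAS AND PROOFS =====

-- F ns v = total decrements needed to bring every element of ns down to at most v.
def F (ns : List Int) (v : Int) : Int := (ns.map (fun x => max 0 (x - v))).sum

theorem F_nonneg (ns : List Int) (v : Int) : 0 ≤ F ns v := by
  induction ns with
  | nil => simp [F]
  | cons a t ih => simp only [F, List.map_cons, List.sum_cons] at *; omega

theorem F_cons (a : Int) (t : List Int) (v : Int) :
    F (a :: t) v = max 0 (a - v) + F t v := by simp [F]

theorem F_antitone (ns : List Int) {v w : Int} (h : v ≤ w) : F ns w ≤ F ns v := by
  induction ns with
  | nil => simp [F]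
  | cons a t ih => simp only [F, List.map_cons, List.sum_cons] at *; omega

theorem term_le_F (ns : List Int) (v : Int) {x : Int} (hx : x ∈ ns) :
    max 0 (x - v) ≤ F ns v := by
  induction ns with
  | nil => simp at hx
  | cons a t ih =>
    have hF := F_nonneg t v
    rcases List.mem_cons.mp hx with h | h
    · subst h; rw [F_cons]; omega
    · have := ih h; rw [F_cons]; omega

theorem F_eq_zero_iff (ns : List Int) (v : Int) :
    F ns v = 0 ↔ ∀ x ∈ ns, x ≤ v := by
  induction ns with
  | nil => simp [F]
  | cons a t ih =>
    have hF := F_nonneg t v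
    rw [F_cons]
    constructor
    · intro h x hx
      rcases List.mem_cons.mp hx with hh | hh
      · subst hh; omega
      · exact (ih.mp (by omega)) x hh
    · intro h
      have h1 : a ≤ v := h a (by simp)
      have h2 : F t v = 0 := ih.mpr (fun x hx => h x (List.mem_cons_of_mem _ hx))
      omega

theorem F_perm {ns ms : List Int} (h : ns.Perm ms) (v : Int) : F ns v = F ms v :=
  List.Perm.sum_eq (h.map _)

-- F over the negated heap equals F over the original numbers.
theorem F_map_neg_neg (ns : List Int) (v : Int) :
    F ((ns.map (fun x => -x)).map (fun x => -x)) v = F ns v := by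
  simp [F]

-- Values of the heap h are the negations of its entries; G h v = F (values) v.
def G (h : List Int) (v : Int) : Int := F (h.map (fun x => -x)) v

theorem min?_spec {h : List Int} (hne : h ≠ []) :
    ∃ μ, PySem.List.min? h (fun x => x) = some μ ∧ μ ∈ h ∧ ∀ y ∈ h, μ ≤ y := by
  cases hm : PySem.List.min? h (fun x => x) with
  | none => exact absurd ((PySem.List.min?_eq_none_iff _ _).mp hm) hne
  | some μ => exact ⟨μ, rfl, PySem.List.min?_mem hm, PySem.List.min?_isMin hm⟩

theorem G_step {h : List Int} (hne : h ≠ []) (v : Int) :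
    G (aStep h) v = max 0 (G h v - 1) := by
  obtain ⟨μ, hm, hmem, hmin⟩ := min?_spec hne
  have hperm : h.Perm (μ :: h.erase μ) := List.perm_cons_erase hmem
  have hG : G h v = max 0 (-μ - v) + G (h.erase μ) v := by
    have := F_perm (ns := h.map (fun x => -x)) (ms := (μ :: h.erase μ).map (fun x => -x))
      (hperm.map _) v
    simpa [G, F_cons] using this
  have hstep : aStep h = (μ + 1) :: h.erase μ := by simp [aStep, hm]
  have hG' : G (aStep h) v = max 0 (-(μ + 1) - v) + G (h.erase μ) v := by
    rw [hstep]; simp [G, F_cons]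
  by_cases hc : v < -μ
  · -- the decremented element was above v: F drops by exactly 1
    have hterm : max 0 (-μ - v) ≤ G h v := term_le_F _ _ (by
      simp only [List.mem_map]; exact ⟨μ, hmem, rfl⟩)
    omega
  · -- every value is ≤ v already: F is 0 and stays 0
    have hzero : G h v = 0 := by
      refine (F_eq_zero_iff _ _).mpr ?_
      intro x hx
      obtain ⟨y, hy, rfl⟩ := List.mem_map.mp hx
      have := hmin y hy
      omega
    have hzero' : G (h.erase μ) v = 0 := by
      have hGnn := F_nonneg ((h.erase μ).map (fun x => -x)) v
      simp only [G] at *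
      omega
    omega

theorem aStep_ne_nil {h : List Int} (hne : h ≠ []) : aStep h ≠ [] := by
  obtain ⟨μ, hm, _, _⟩ := min?_spec hne
  simp [aStep, hm]

theorem G_iter (k : Nat) {h : List Int} (hne : h ≠ []) (v : Int) :
    G (aIter k h) v = max 0 (G h v - k) ∧ aIter k h ≠ [] := by
  induction k generalizing h with
  | zero => exact ⟨by have := F_nonneg (h.map (fun x => -x)) v; simp [aIter, G]; omega, hne⟩
  | succ n ih =>
    obtain ⟨h1, h2⟩ := ih (aStep_ne_nil hne)
    refine ⟨?_, h2⟩
    rw [aIter, h1, G_step hne v]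
    push_cast
    omega

-- A's result r satisfies F ns r ≤ max m 0 < F ns (r - 1).
theorem A_char (ns : List Int) (m : Int) (hne : ns ≠ []) :
    F ns (find_max_after_operations ns m) ≤ max m 0 ∧
    max m 0 < F ns (find_max_after_operations ns m - 1) := by
  have hne0 : ns.map (fun x => -x) ≠ [] := by simpa using hne
  have hiter := fun v => G_iter m.toNat hne0 v
  obtain ⟨μ, hm, hmem, hmin⟩ := min?_spec (hiter 0).2
  have hres : find_max_after_operations ns m = -μ := by
    simp [find_max_after_operations, hm]  -- uses hm
  rw [hres]
  have hzero : G (aIter m.toNat (ns.map (fun x => -x))) (-μ) = 0 := by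
    refine (F_eq_zero_iff _ _).mpr ?_
    intro x hx
    obtain ⟨y, hy, rfl⟩ := List.mem_map.mp hx
    have := hmin y hy; omega
  have hpos : 0 < G (aIter m.toNat (ns.map (fun x => -x))) (-μ - 1) := by
    have : max 0 (-μ - (-μ - 1)) ≤ G (aIter m.toNat (ns.map (fun x => -x))) (-μ - 1) :=
      term_le_F _ _ (by simp only [List.mem_map]; exact ⟨μ, hmem, rfl⟩)
    omega
  have e1 := (hiter (-μ)).1
  have e2 := (hiter (-μ - 1)).1
  rw [hzero] at e1
  have hg1 : G (ns.map (fun x => -x)) (-μ) = F ns (-μ) := F_map_neg_neg ns (-μ)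
  have hg2 : G (ns.map (fun x => -x)) (-μ - 1) = F ns (-μ - 1) := F_map_neg_neg ns (-μ - 1)
  rw [hg1] at e1
  rw [e2, hg2] at hpos
  have hk : (m.toNat : Int) = max m 0 := by omega
  omega

-- bCost is F.
theorem bCost_eq_F (ns : List Int) (v : Int) : bCost ns v = F ns v := by
  induction ns with
  | nil => simp [bCost, F]
  | cons a t ih =>
    simp only [bCost, F, List.foldl_cons, List.map_cons, List.sum_cons] at *
    by_cases hc : a > v
    · rw [if_pos hc]
      have : ∀ (acc : Int) (l : List Int),
          l.foldl (fun acc num => if num > v then acc + (num - v) else acc) acc =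
          acc + l.foldl (fun acc num => if num > v then acc + (num - v) else acc) 0 := by
        intro acc l
        induction l generalizing acc with
        | nil => simp
        | cons b t2 ih2 =>
          simp only [List.foldl_cons]
          rw [ih2, ih2 (if b > v then 0 + (b - v) else 0)]
          split_ifs <;> ring
      rw [this]
      omega
    · rw [if_neg hc]; omega

-- Binary-search correctness: result r ∈ [lo, hi], nothing in [lo, r) satisfies the
-- predicate, and either F r ≤ m or r = hi.
theorem bSearch_spec (ns : List Int) (m : Int) : ∀ n (lo hi : Int), (hi - lo).toNat = n → lo ≤ hi →
    lo ≤ bSearch ns m lo hi ∧ bSearch ns m lo hi ≤ hi ∧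
    (∀ v, lo ≤ v → v < bSearch ns m lo hi → m < F ns v) ∧
    (F ns (bSearch ns m lo hi) ≤ m ∨ bSearch ns m lo hi = hi) := by
  intro n
  induction n using Nat.strong_induction_on with
  | _ n ih =>
    intro lo hi hn hle
    by_cases hlt : lo < hi
    · have hmid := PySem.Int.floordiv_two_mid_bounds (lo := lo) (hi := hi) (by omega)
      have hmidlt : PySem.Int.floordiv (lo + hi) 2 < hi := by
        have := PySem.Int.floordiv_eq_ediv_of_pos (a := lo + hi) (b := 2) (by omega)
        omega
      rw [bSearch, dif_pos hlt]
      by_cases hc : bCost ns (PySem.Int.floordiv (lo + hi) 2) ≤ m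
      · rw [if_pos hc]
        have := ih (hi := PySem.Int.floordiv (lo + hi) 2) (lo := lo)
          ((PySem.Int.floordiv (lo + hi) 2 - lo).toNat) (by omega) rfl (by omega)
        obtain ⟨i1, i2, i3, i4⟩ := this
        refine ⟨i1, by omega, i3, ?_⟩
        rcases i4 with h | h
        · exact Or.inl h
        · rw [h]; left; rw [← bCost_eq_F]; exact hc
      · rw [if_neg hc]
        rw [bCost_eq_F] at hc
        have := ih (hi := hi) (lo := PySem.Int.floordiv (lo + hi) 2 + 1)
          ((hi - (PySem.Int.floordiv (lo + hi) 2 + 1)).toNat) (by omega) rfl (by omega)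
        obtain ⟨i1, i2, i3, i4⟩ := this
        refine ⟨by omega, i2, ?_, i4⟩
        intro v hv1 hv2
        by_cases hvm : v ≤ PySem.Int.floordiv (lo + hi) 2
        · have := F_antitone ns hvm; omega
        · exact i3 v (by omega) hv2
    · rw [bSearch, dif_neg hlt]
      exact ⟨le_refl _, hle, fun v h1 h2 => absurd (lt_of_le_of_lt h1 h2) (lt_irrefl _), Or.inr (by omega)⟩

-- the characterization F r ≤ c < F (r-1) has a unique solution (F antitone)
theorem char_unique (ns : List Int) (c : Int) {a b : Int}
    (ha1 : F ns a ≤ c) (ha2 : c < F ns (a - 1))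
    (hb1 : F ns b ≤ c) (hb2 : c < F ns (b - 1)) : a = b := by
  by_contra hne
  rcases lt_or_gt_of_ne hne with h | h
  · have := F_antitone ns (v := a) (w := b - 1) (by omega); omega
  · have := F_antitone ns (v := b) (w := a - 1) (by omega); omega

theorem B_char (ns : List Int) (m : Int) (hne : ns ≠ []) :
    F ns (find_max_after_operations_alt ns m) ≤ max m 0 ∧
    max m 0 < F ns (find_max_after_operations_alt ns m - 1) := by
  obtain ⟨μ, hm, hμmem, hμmin⟩ := min?_spec hne
  cases hM : PySem.List.max? ns (fun x => x) with
  | none => exact absurd ((PySem.List.max?_eq_none_iff _ _).mp hM) hne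
  | some M =>
  have hMmem : M ∈ ns := PySem.List.max?_mem hM
  have hMmax : ∀ y ∈ ns, y ≤ M := PySem.List.max?_isMax hM
  have halt : find_max_after_operations_alt ns m = bSearch ns m (μ - max m 0) M := by
    simp [find_max_after_operations_alt, hm, hM]
  have hμM : μ ≤ M := hμmin M hMmem
  have hsp := bSearch_spec ns m ((M - (μ - max m 0)).toNat) (μ - max m 0) M rfl (by omega)
  obtain ⟨i1, i2, i3, i4⟩ := hsp
  set r := bSearch ns m (μ - max m 0) M with hr
  rw [halt]
  have hFM : F ns M = 0 := (F_eq_zero_iff ns M).mpr hMmax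
  -- upper part: F r ≤ max m 0
  have hup : F ns r ≤ max m 0 := by
    rcases i4 with h | h
    · have := F_nonneg ns r; omega
    · rw [h, hFM]; omega
  refine ⟨hup, ?_⟩
  -- lower part: max m 0 < F ns (r - 1)
  by_cases hlo : μ - max m 0 ≤ r - 1
  · -- r - 1 is inside the searched interval: predicate fails there
    have hfail := i3 (r - 1) hlo (by omega)
    by_cases hm0 : 0 ≤ m
    · omega
    · -- m < 0: r = M (the predicate F ≤ m never holds since F ≥ 0)
      have hrM : r = M := by
        rcases i4 with h | h
        · have := F_nonneg ns r; omega
        · exact h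
      have : max 0 (M - (r - 1)) ≤ F ns (r - 1) := term_le_F ns (r - 1) hMmem
      omega
  · -- r = μ - max m 0: F (r - 1) ≥ μ - (r - 1) = max m 0 + 1
    have hreq : r = μ - max m 0 := by omega
    have : max 0 (μ - (r - 1)) ≤ F ns (r - 1) := term_le_F ns (r - 1) hμmem
    omega

-- ===== VERDICT (by name: the statement is the Claim_ definition above) =====
theorem find_max_after_operations_spec : Claim_equal_find_max_after_operations := by
  intro numbers m _ hpre
  have hA := A_char numbers m hpre
  have hB := B_char numbers m hpre
  exact char_unique numbers (max m 0) hA.1 hA.2 hB.1 hB.2
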